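-- pv_equiv track=rewrite | github.com/itisdifficulttocreateaname/test | SWC/src/cmd_EncodeColor.py | nearest_nums
-- ===== SOURCE A (Python) =====
-- def nearest_nums(num, list):
--     m, M = None, None
--
--     for item in list:
--         if item < num:
--             m = item if m is None else max(item, m)
--         else:
--             M = item if M is None else min(item, M)
--
--     return m, M
-- ===== SOURCE B (Python) =====
-- def nearest_nums(num, list):
--     lower = [x for x in list if x < num]
--     upper = [x for x in list if x >= num]
--     m = max(lower) if lower else None
--     M = min(upper) if upper else None
--     return m, M
-- ===== Notes on version B (the rewrite author's own statement) =====
-- stated objective: simpler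
-- what changed: Replaces the single running-extrema loop carrying two optional accumulators with a partition-first decomposition: filter the list into lower/upper halves and reduce each with max/min, guarding the empty case.
import Mathlib
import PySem

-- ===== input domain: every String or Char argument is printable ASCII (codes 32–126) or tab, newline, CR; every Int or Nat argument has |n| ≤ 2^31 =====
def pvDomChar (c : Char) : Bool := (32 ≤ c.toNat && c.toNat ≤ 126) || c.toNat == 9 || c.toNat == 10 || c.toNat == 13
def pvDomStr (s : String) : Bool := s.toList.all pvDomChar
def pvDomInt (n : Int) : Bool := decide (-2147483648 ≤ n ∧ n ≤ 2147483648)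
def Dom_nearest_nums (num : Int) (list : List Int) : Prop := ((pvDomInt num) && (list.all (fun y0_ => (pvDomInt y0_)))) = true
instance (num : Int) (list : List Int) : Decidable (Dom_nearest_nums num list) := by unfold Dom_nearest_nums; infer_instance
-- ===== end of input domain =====

-- B replaces A's single running-extrema loop with partition-then-reduce (simpler decomposition).
-- ===== PORT A =====
def nearest_nums (num : Int) (list : List Int) : Option Int × Option Int :=
  list.foldl
    (fun st item =>
      if item < num then
        (some (match st.1 with | none => item | some m => max item m), st.2)
      else
        (st.1, some (match st.2 with | none => item | some M => min item M)))
    (none, none)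

-- ===== PORT B =====
def nearest_nums_alt (num : Int) (list : List Int) : Option Int × Option Int :=
  let lower := list.filter (fun x => x < num)
  let upper := list.filter (fun x => num ≤ x)
  (lower.max?, upper.min?)

-- ===== PRECONDITION & SPEC =====
def Spec_nearest_nums (num : Int) (list : List Int) (out : Option Int × Option Int) : Prop := out = nearest_nums_alt num list
instance (num : Int) (list : List Int) (out : Option Int × Option Int) : Decidable (Spec_nearest_nums num list out) := by unfold Spec_nearest_nums; infer_instance

-- ===== CLAIM (what is proved, stated in full; the proofs are below) =====
def Claim_equal_nearest_nums : Prop := ∀ (num : Int) (list : List Int), Dom_nearest_nums num list → Spec_nearest_nums num list (nearest_nums num list)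

-- ===== LEMMAS AND PROOFS =====

def pvAccMax (o : Option Int) (x : Int) : Option Int :=
  some (match o with | none => x | some a => max x a)

def pvAccMin (o : Option Int) (x : Int) : Option Int :=
  some (match o with | none => x | some a => min x a)

-- A's fold splits into two independent option-folds over the two filtered sublists.
theorem pvFoldSplit (num : Int) (l : List Int) : ∀ (m M : Option Int),
    l.foldl
      (fun st item =>
        if item < num then
          (some (match st.1 with | none => item | some m => max item m), st.2)
        else
          (st.1, some (match st.2 with | none => item | some M => min item M)))
      (m, M)
    = ((l.filter (fun x => x < num)).foldl pvAccMax m,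
       (l.filter (fun x => num ≤ x)).foldl pvAccMin M) := by
  induction l with
  | nil => intro m M; simp
  | cons x t ih =>
    intro m M
    by_cases h : x < num
    · have h' : ¬ num ≤ x := by omega
      simp [h, h', ih, pvAccMax]
    · have h' : num ≤ x := by omega
      simp [h, h', ih, pvAccMin]

theorem pvFoldMax (a : Int) (l : List Int) : l.foldl pvAccMax (some a) = some (l.foldl max a) := by
  induction l generalizing a with
  | nil => rfl
  | cons x t ih => simp [pvAccMax, ih, max_comm]

theorem pvFoldMin (a : Int) (l : List Int) : l.foldl pvAccMin (some a) = some (l.foldl min a) := by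
  induction l generalizing a with
  | nil => rfl
  | cons x t ih => simp [pvAccMin, ih, min_comm]

theorem pvMaxNone (l : List Int) : l.foldl pvAccMax none = l.max? := by
  cases l with
  | nil => rfl
  | cons x t => simp [pvAccMax, pvFoldMax, List.max?]

theorem pvMinNone (l : List Int) : l.foldl pvAccMin none = l.min? := by
  cases l with
  | nil => rfl
  | cons x t => simp [pvAccMin, pvFoldMin, List.min?]

-- ===== VERDICT (by name: the statement is the Claim_ definition above) =====
theorem nearest_nums_spec : Claim_equal_nearest_nums := by
  intro num list _
  unfold Spec_nearest_nums nearest_nums nearest_nums_alt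
  rw [pvFoldSplit, pvMaxNone, pvMinNone]
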